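-- pv_equiv track=rewrite | github.com/Hoblovski/cmdgrp | cmdgrp.py | make_chs
-- ===== SOURCE A (Python) =====
-- def make_chs(ilevels):
--     chs = {-1: []}
--     prs = []
--     last_ilevel = {-1: -1}
--     for idx, ilevel in enumerate(ilevels):
--         chs[idx] = []
--         prs.append(last_ilevel[ilevel - 1])
--         chs[prs[idx]].append(idx)
--         last_ilevel[ilevel] = idx
--     return chs, prs
-- ===== SOURCE B (Python) =====
-- def make_chs(ilevels):
--     # Dict-free parent computation: each parent is found by a direct backward
--     # scan for the most recent index at the previous indentation level; the
--     # children mapping is then grouped from the finished parent list.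
--     n = len(ilevels)
--
--     def parent(i):
--         lv = ilevels[i]
--         if lv == 0:
--             return -1
--         for j in range(i - 1, -1, -1):
--             if ilevels[j] == lv - 1:
--                 return j
--         raise KeyError(lv - 1)
--
--     prs = [parent(i) for i in range(n)]
--     chs = {p: [] for p in range(-1, n)}
--     for i, p in enumerate(prs):
--         chs[p].append(i)
--     return chs, prs
-- ===== Notes on version B (the rewrite author's own statement) =====
-- stated objective: alternative
-- what changed: A makes one interleaved pass that memoizes the last index of every level in a last_ilevel dict and mutates the children dict as it goes; B drops the memoization dict entirely: each element's parent is found by a direct backward scan for the most recent index at the previous indentation level, and the children mapping is grouped afterwards from the finished parent list.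
import Mathlib
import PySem

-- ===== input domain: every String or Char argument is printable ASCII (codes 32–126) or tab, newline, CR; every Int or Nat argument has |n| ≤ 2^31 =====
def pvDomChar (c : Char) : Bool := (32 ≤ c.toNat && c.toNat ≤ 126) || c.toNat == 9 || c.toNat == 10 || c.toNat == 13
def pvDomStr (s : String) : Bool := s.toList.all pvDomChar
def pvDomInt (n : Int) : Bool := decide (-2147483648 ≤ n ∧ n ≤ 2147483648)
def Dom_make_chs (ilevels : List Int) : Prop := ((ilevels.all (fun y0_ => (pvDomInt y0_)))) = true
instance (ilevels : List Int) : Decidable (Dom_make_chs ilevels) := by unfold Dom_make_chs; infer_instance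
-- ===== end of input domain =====

-- B replaces A's last_ilevel dict memoization by a direct backward scan per element and groups
-- the children mapping afterwards from the finished parent list; equal return value on Pre_
-- (where Python A does not raise KeyError).

-- ===== PORT A =====
-- the loop returns none exactly where Python raises KeyError (last_ilevel[ilevel-1] missing)
def makeChsLoopA : List Int → Int → PySem.Dict Int (List Int) → List Int → PySem.Dict Int Int →
    Option (PySem.Dict Int (List Int) × List Int)
  | [], _, chs, prs, _ => some (chs, prs)
  | ilevel :: rest, idx, chs, prs, last_ilevel =>
    let chs1 := chs.insert idx []                         -- chs[idx] = []
    match last_ilevel.get? (ilevel - 1) with              -- last_ilevel[ilevel - 1]  (KeyError → none)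
    | none => none
    | some p =>
        -- prs.append(p); chs[prs[idx]].append(idx); last_ilevel[ilevel] = idx
        makeChsLoopA rest (idx + 1) (chs1.modify p [] (fun l => l ++ [idx]))
          (prs ++ [p]) (last_ilevel.insert ilevel idx)

def make_chs (ilevels : List Int) : (List (Int × List Int)) × List Int :=
  match makeChsLoopA ilevels 0 (PySem.Dict.empty.insert (-1) []) [] (PySem.Dict.empty.insert (-1) (-1)) with
  | none => ([], [])                                      -- unreachable under Pre_ (Python raises)
  | some (chs, prs) => (chs.items, prs)

-- ===== PORT B =====
-- for j in range(i - 1, -1, -1): if ilevels[j] == lv - 1: return j   (downward loop as Nat recursion;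
-- pyGetD is exact here: j < i ≤ len(ilevels) always in range)
def scanBack (ilevels : List Int) (target : Int) : Nat → Option Int
  | 0 => none                                             -- loop fell through: raise KeyError → none
  | j + 1 => if PySem.List.pyGetD ilevels (j : Int) 0 == target then some ((j : Nat) : Int)
             else scanBack ilevels target j

def parent_alt (ilevels : List Int) (i : Int) : Option Int :=
  let lv := PySem.List.pyGetD ilevels i 0                 -- ilevels[i], i from range(n): in range
  if lv == 0 then some (-1)
  else scanBack ilevels (lv - 1) i.toNat                  -- i from range(n): 0 ≤ i

-- prs = [parent(i) for i in range(n)]  (Option threads the KeyError)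
def prsList (ilevels : List Int) : List Int → Option (List Int)
  | [] => some []
  | i :: rest =>
    match parent_alt ilevels i with
    | none => none
    | some p => (prsList ilevels rest).map (fun t => p :: t)

def make_chs_alt (ilevels : List Int) : (List (Int × List Int)) × List Int :=
  match prsList ilevels (PySem.List.pyRange 0 (ilevels.length : Int) 1) with
  | none => ([], [])                                      -- unreachable under Pre_ (Python raises)
  | some prs =>
      -- chs = {p: [] for p in range(-1, n)}
      let chs0 := (PySem.List.pyRange (-1) (ilevels.length : Int) 1).foldl
        (fun d p => d.insert p ([] : List Int)) PySem.Dict.empty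
      -- for i, p in enumerate(prs): chs[p].append(i)
      let chs := (PySem.List.enumerate prs).foldl
        (fun d ip => d.modify ip.2 [] (fun l => l ++ [ip.1])) chs0
      (chs.items, prs)

-- ===== PRECONDITION & SPEC =====
-- Pre_ excludes exactly the inputs where Python A raises KeyError: some level whose
-- predecessor level never occurred earlier (and is not level 0, whose parent is the -1 sentinel).
def Pre_make_chs (ilevels : List Int) : Prop :=
  ((List.range ilevels.length).all (fun i =>
    ilevels.getD i 0 == 0 || (ilevels.getD i 0 - 1) ∈ ilevels.take i)) = true
instance (ilevels : List Int) : Decidable (Pre_make_chs ilevels) := by unfold Pre_make_chs; infer_instance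

def pvWitness_make_chs : List Int := [0, 1, 1, 2, 0]

def Spec_make_chs (ilevels : List Int) (out : (List (Int × List Int)) × List Int) : Prop := out = make_chs_alt ilevels
instance (ilevels : List Int) (out : (List (Int × List Int)) × List Int) : Decidable (Spec_make_chs ilevels out) := by unfold Spec_make_chs; infer_instance

-- ===== CLAIM (what is proved, stated in full; the proofs are below) =====
def Claim_equal_make_chs : Prop := ∀ (ilevels : List Int), Dom_make_chs ilevels → Pre_make_chs ilevels → Spec_make_chs ilevels (make_chs ilevels)

-- ===== LEMMAS AND PROOFS =====

-- [i for i, q in enumerate(prs) if q == p] — the canonical child list of parent p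
def childrenOf (prs : List Int) (p : Int) : List Int :=
  (PySem.List.enumerate prs).filterMap (fun iq => if iq.2 = p then some iq.1 else none)

-- proof-side canonical form of the children dict determined by a parent list prs
def dictOf (prs : List Int) : PySem.Dict Int (List Int) :=
  PySem.Dict.mk ((PySem.List.pyRange (-1) (prs.length : Int) 1).map (fun p => (p, childrenOf prs p)))

-- proof-side reference: A's parent computation alone (dict memoization, chs stripped away)
def makeChsRef : List Int → PySem.Dict Int Int → List Int → Option (List Int)
  | [], _, prs => some prs
  | ilevel :: rest, last_ilevel, prs =>
    match last_ilevel.get? (ilevel - 1) with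
    | none => none
    | some p =>
        makeChsRef rest (last_ilevel.insert ilevel (((prs ++ [p]).length : Int) - 1)) (prs ++ [p])

lemma enumerate_append_singleton (xs : List Int) (x : Int) (s : Int) :
    PySem.List.enumerate (xs ++ [x]) s = PySem.List.enumerate xs s ++ [(s + xs.length, x)] := by
  induction xs generalizing s with
  | nil => simp [PySem.List.enumerate_cons]
  | cons y ys ih =>
      simp only [List.cons_append, PySem.List.enumerate_cons, ih (s + 1), List.length_cons]
      have h : s + 1 + (ys.length : Int) = s + (((ys.length + 1 : Nat)) : Int) := by
        push_cast; ring
      rw [h]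

lemma childrenOf_append (prs : List Int) (p q : Int) :
    childrenOf (prs ++ [p]) q
      = childrenOf prs q ++ (if q = p then [(prs.length : Int)] else []) := by
  simp only [childrenOf, enumerate_append_singleton, List.filterMap_append]
  by_cases h : p = q <;> simp [h, eq_comm]

lemma childrenOf_eq_nil (prs : List Int) (q : Int) (h : q ∉ prs) : childrenOf prs q = [] := by
  refine List.filterMap_eq_nil_iff.mpr ?_
  intro a ha
  have h2 : a.2 ∈ prs := by
    have := PySem.List.map_snd_enumerate prs 0
    rw [← this]
    exact List.mem_map_of_mem ha
  simp only [ite_eq_right_iff]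
  intro he; exact absurd (he ▸ h2) h

lemma keys_dictOf (prs : List Int) :
    (dictOf prs).keys = PySem.List.pyRange (-1) (prs.length : Int) 1 := by
  simp [dictOf, PySem.Dict.keys, Function.comp_def]

lemma nodup_keys_dictOf (prs : List Int) : (dictOf prs).keys.Nodup := by
  rw [keys_dictOf]; exact PySem.List.nodup_pyRange_one _ _

lemma getD_dictOf (prs : List Int) (q : Int)
    (hvals : ∀ x ∈ prs, -1 ≤ x ∧ x < (prs.length : Int)) :
    (dictOf prs).getD q [] = childrenOf prs q := by
  by_cases hq : -1 ≤ q ∧ q < (prs.length : Int)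
  · have hmem : (q, childrenOf prs q) ∈ (dictOf prs).items := by
      show (q, childrenOf prs q)
        ∈ (PySem.List.pyRange (-1) (prs.length : Int) 1).map (fun p => (p, childrenOf prs p))
      exact List.mem_map_of_mem (PySem.List.mem_pyRange_one.mpr hq)
    exact PySem.Dict.getD_of_mem_items _ hmem (nodup_keys_dictOf prs) []
  · have hnk : q ∉ (dictOf prs).keys := by
      rw [keys_dictOf]
      intro hm; exact hq (PySem.List.mem_pyRange_one.mp hm)
    have hc : (dictOf prs).contains q = false := by
      by_contra hb
      exact hnk ((PySem.Dict.contains_iff_mem_keys _ _).mp (by simpa using hb))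
    rw [PySem.Dict.getD_of_not_contains _ _ hc]
    refine (childrenOf_eq_nil prs q ?_).symm
    intro hm; exact hq (hvals q hm)

lemma step_dict (prs : List Int) (p : Int)
    (hvals : ∀ x ∈ prs, -1 ≤ x ∧ x < (prs.length : Int))
    (h0 : -1 ≤ p) (h1 : p < (prs.length : Int)) :
    ((dictOf prs).insert (prs.length : Int) []).modify p [] (fun l => l ++ [(prs.length : Int)])
      = dictOf (prs ++ [p]) := by
  have hidx_notin : ¬ (prs.length : Int) ∈ (dictOf prs).keys := by
    rw [keys_dictOf]
    intro hm
    have := (PySem.List.mem_pyRange_one.mp hm).2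
    omega
  have hcont : (dictOf prs).contains (prs.length : Int) = false := by
    by_contra hb
    exact hidx_notin ((PySem.Dict.contains_iff_mem_keys _ _).mp (by simpa using hb))
  have hk1 : ((dictOf prs).insert (prs.length : Int) ([] : List Int)).keys
      = PySem.List.pyRange (-1) ((prs.length : Int) + 1) 1 := by
    rw [PySem.Dict.keys_insert_of_not_contains _ _ hcont, keys_dictOf,
      PySem.List.pyRange_one_succ_right (by omega : (-1 : Int) ≤ (prs.length : Int))]
  have hp_mem : p ∈ ((dictOf prs).insert (prs.length : Int) ([] : List Int)).keys := by
    rw [hk1]; exact PySem.List.mem_pyRange_one.mpr ⟨h0, by omega⟩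
  have hcontp : ((dictOf prs).insert (prs.length : Int) ([] : List Int)).contains p = true :=
    (PySem.Dict.contains_iff_mem_keys _ _).mpr hp_mem
  have hk2 : (((dictOf prs).insert (prs.length : Int) ([] : List Int)).modify p []
      (fun l => l ++ [(prs.length : Int)])).keys
      = PySem.List.pyRange (-1) ((prs.length : Int) + 1) 1 := by
    rw [PySem.Dict.keys_modify, PySem.Dict.keys_insert_of_contains _ _ hcontp, hk1]
  have hlen : ((prs ++ [p]).length : Int) = (prs.length : Int) + 1 := by simp
  have hgd : ∀ q : Int, (((dictOf prs).insert (prs.length : Int) ([] : List Int)).modify p []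
      (fun l => l ++ [(prs.length : Int)])).getD q [] = childrenOf (prs ++ [p]) q := by
    intro q
    rw [PySem.Dict.getD_modify, PySem.Dict.getD_insert, PySem.Dict.getD_insert,
      childrenOf_append]
    by_cases hqp : q = p
    · have hpidx : ¬ p = (prs.length : Int) := by omega
      simp [hqp, hpidx, getD_dictOf prs p hvals]
    · by_cases hqi : q = (prs.length : Int)
      · have hnil : childrenOf prs (prs.length : Int) = [] := by
          refine childrenOf_eq_nil prs (prs.length : Int) ?_
          intro hm
          have := (hvals _ hm).2
          omega
        have hip : ¬ (prs.length : Int) = p := by omega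
        simp [hqi, hnil, hip]
      · simp [hqp, hqi, getD_dictOf prs q hvals]
  apply PySem.Dict.ext
  rw [PySem.Dict.items_eq_map_keys _
      (by rw [hk2]; exact PySem.List.nodup_pyRange_one _ _) ([] : List Int), hk2]
  have hR : (dictOf (prs ++ [p])).items
      = (PySem.List.pyRange (-1) ((prs.length : Int) + 1) 1).map
          (fun q => (q, childrenOf (prs ++ [p]) q)) := by
    simp only [dictOf, hlen]
  rw [hR]
  exact List.map_congr_left (fun q _ => by rw [hgd q])

lemma loopA_eq (lvls : List Int) : ∀ (prs : List Int) (li : PySem.Dict Int Int),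
    (∀ x ∈ prs, -1 ≤ x ∧ x < (prs.length : Int)) →
    (∀ k v, li.get? k = some v → -1 ≤ v ∧ v < (prs.length : Int)) →
    makeChsLoopA lvls (prs.length : Int) (dictOf prs) prs li =
      (makeChsRef lvls li prs).map (fun prs' => (dictOf prs', prs')) := by
  induction lvls with
  | nil => intro prs li _ _; simp [makeChsLoopA, makeChsRef]
  | cons lvl rest ih =>
      intro prs li hvals hli
      simp only [makeChsLoopA, makeChsRef]
      cases hg : li.get? (lvl - 1) with
      | none => simp
      | some p =>
          obtain ⟨hp0, hp1⟩ := hli _ _ hg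
          simp only []
          have hlen : ((prs ++ [p]).length : Int) = (prs.length : Int) + 1 := by simp
          have hstep := step_dict prs p hvals hp0 hp1
          rw [hstep]
          have hvals' : ∀ x ∈ prs ++ [p], -1 ≤ x ∧ x < ((prs ++ [p]).length : Int) := by
            intro x hx
            rw [hlen]
            rcases List.mem_append.mp hx with h | h
            · have := hvals x h; omega
            · simp at h; omega
          have hli' : ∀ k v, (li.insert lvl ((prs.length : Int))).get? k = some v →
              -1 ≤ v ∧ v < ((prs ++ [p]).length : Int) := by
            intro k v hk
            rw [hlen]
            rw [PySem.Dict.get?_insert] at hk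
            split at hk
            · cases hk; omega
            · have := hli _ _ hk; omega
          have hins : li.insert lvl (((prs ++ [p]).length : Int) - 1)
              = li.insert lvl ((prs.length : Int)) := by
            rw [hlen]; ring_nf
          rw [hins, ← hlen]
          exact ih (prs ++ [p]) (li.insert lvl ((prs.length : Int))) hvals' hli'

lemma prsList_length (ilevels : List Int) : ∀ (l : List Int) (out : List Int),
    prsList ilevels l = some out → out.length = l.length := by
  intro l
  induction l with
  | nil => intro out h; simp [prsList] at h; simp [← h]
  | cons i rest ih =>
      intro out h
      simp only [prsList] at h
      cases hp : parent_alt ilevels i with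
      | none => rw [hp] at h; simp at h
      | some p =>
          rw [hp] at h
          cases hr : prsList ilevels rest with
          | none => rw [hr] at h; simp at h
          | some t =>
              rw [hr] at h
              simp at h
              simp [← h, ih t hr]

lemma scanBack_some (ilevels : List Int) (t : Int) : ∀ (k : Nat) (p : Int),
    scanBack ilevels t k = some p →
    ∃ j : Nat, j < k ∧ p = (j : Int) ∧ PySem.List.pyGetD ilevels (j : Int) 0 = t := by
  intro k
  induction k with
  | zero => intro p h; simp [scanBack] at h
  | succ j ih =>
      intro p h
      by_cases hc : (PySem.List.pyGetD ilevels (j : Int) 0 == t) = true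
      · rw [scanBack, if_pos hc] at h
        cases h
        exact ⟨j, Nat.lt_succ_self j, rfl, beq_iff_eq.mp hc⟩
      · rw [scanBack, if_neg hc] at h
        obtain ⟨j', hj', hp, hv⟩ := ih p h
        exact ⟨j', by omega, hp, hv⟩

-- the heart: A's dict memoization computes exactly B's backward scans
lemma ref_eq_scan (ilevels : List Int) : ∀ (m k : Nat) (li : PySem.Dict Int Int) (prs : List Int),
    m = ilevels.length - k → k ≤ ilevels.length → prs.length = k →
    (∀ t : Int, li.get? t = if t = -1 then some (-1) else scanBack ilevels t k) →
    (∀ j : Nat, j < k → 0 ≤ ilevels.getD j 0) →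
    makeChsRef (ilevels.drop k) li prs
      = (prsList ilevels (PySem.List.pyRange (k : Int) (ilevels.length : Int) 1)).map
          (fun tl => prs ++ tl) := by
  intro m
  induction m with
  | zero =>
      intro k li prs hm hk _ _ _
      have hke : k = ilevels.length := by omega
      subst hke
      rw [List.drop_length, PySem.List.pyRange_one_eq_nil (le_refl _)]
      simp [makeChsRef, prsList]
  | succ m ih =>
      intro k li prs hm hk hplen hInv hnn
      have hklt : k < ilevels.length := by omega
      have hdrop : ilevels.drop k = ilevels[k] :: ilevels.drop (k + 1) :=
        List.drop_eq_getElem_cons hklt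
      have hgetD : ilevels.getD k 0 = ilevels[k] := List.getD_eq_getElem ilevels 0 hklt
      set lv := ilevels[k] with hlv
      have hpyget : PySem.List.pyGetD ilevels ((k : Nat) : Int) 0 = lv := by
        rw [PySem.List.pyGetD_natCast, hgetD]
      have hrange : PySem.List.pyRange (k : Int) (ilevels.length : Int) 1
          = (k : Int) :: PySem.List.pyRange ((k : Int) + 1) (ilevels.length : Int) 1 :=
        PySem.List.pyRange_one_cons (by exact_mod_cast hklt)
      have hlen1 : ∀ p : Int, ((prs ++ [p]).length : Int) - 1 = (k : Int) := by
        intro p; simp [hplen]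
      have hrange' : ((k : Int) + 1) = (((k + 1 : Nat)) : Int) := by push_cast; ring
      rw [hdrop, hrange]
      have hscan_succ : ∀ t : Int, scanBack ilevels t (k + 1)
          = if lv == t then some ((k : Nat) : Int) else scanBack ilevels t k := by
        intro t
        simp only [scanBack, hpyget]
      by_cases h0 : lv = 0
      · -- parent is the -1 sentinel
        have hA : li.get? (lv - 1) = some (-1) := by
          rw [hInv]; simp [h0]
        have hB : parent_alt ilevels ((k : Nat) : Int) = some (-1) := by
          simp [parent_alt, hpyget, h0]
        simp only [makeChsRef, prsList, hA, hB]
        have hInv' : ∀ t : Int, (li.insert lv (((prs ++ [(-1 : Int)]).length : Int) - 1)).get? t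
            = if t = -1 then some (-1) else scanBack ilevels t (k + 1) := by
          intro t
          rw [hlen1, PySem.Dict.get?_insert, hscan_succ]
          by_cases ht : t = lv
          · simp [ht, h0]
          · simp [hInv t, ht, show ¬ lv = t from fun he => ht he.symm]
        have hnn' : ∀ j : Nat, j < k + 1 → 0 ≤ ilevels.getD j 0 := by
          intro j hj
          by_cases hjk : j = k
          · rw [hjk, hgetD]; omega
          · exact hnn j (by omega)
        have := ih (k + 1) (li.insert lv (((prs ++ [(-1 : Int)]).length : Int) - 1))
          (prs ++ [(-1 : Int)]) (by omega) (by omega) (by simp [hplen]) hInv' hnn'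
        rw [hrange', this]
        cases prsList ilevels (PySem.List.pyRange (((k + 1 : Nat)) : Int) (ilevels.length : Int) 1) with
        | none => simp
        | some tl => simp
      · -- parent by lookup / backward scan
        have hA : li.get? (lv - 1) = scanBack ilevels (lv - 1) k := by
          rw [hInv]
          have : ¬ lv - 1 = -1 := by omega
          simp [this]
        have hB : parent_alt ilevels ((k : Nat) : Int) = scanBack ilevels (lv - 1) k := by
          have : ¬ (lv == 0) = true := by simp [h0]
          simp [parent_alt, hpyget, this]
        simp only [makeChsRef, prsList, hA, hB]
        cases hs : scanBack ilevels (lv - 1) k with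
        | none => simp
        | some p =>
            simp only []
            obtain ⟨j, hjk, hpj, hjv⟩ := scanBack_some ilevels (lv - 1) k p hs
            have hlv1 : 0 ≤ lv - 1 := by
              have := hnn j hjk
              rw [PySem.List.pyGetD_natCast] at hjv
              omega
            have hInv' : ∀ t : Int, (li.insert lv (((prs ++ [p]).length : Int) - 1)).get? t
                = if t = -1 then some (-1) else scanBack ilevels t (k + 1) := by
              intro t
              rw [hlen1, PySem.Dict.get?_insert, hscan_succ]
              by_cases ht : t = lv
              · simp [ht]
                omega
              · simp [hInv t, ht, show ¬ lv = t from fun he => ht he.symm]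
            have hnn' : ∀ j : Nat, j < k + 1 → 0 ≤ ilevels.getD j 0 := by
              intro j' hj'
              by_cases hjk' : j' = k
              · rw [hjk', hgetD]; omega
              · exact hnn j' (by omega)
            have := ih (k + 1) (li.insert lv (((prs ++ [p]).length : Int) - 1))
              (prs ++ [p]) (by omega) (by omega) (by simp [hplen]) hInv' hnn'
            rw [hrange', this]
            cases prsList ilevels (PySem.List.pyRange (((k + 1 : Nat)) : Int) (ilevels.length : Int) 1) with
            | none => simp
            | some tl => simp

lemma parent_alt_bounds (ilevels : List Int) (i p : Int) (h0 : 0 ≤ i)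
    (h : parent_alt ilevels i = some p) : -1 ≤ p ∧ p < i := by
  simp only [parent_alt] at h
  split at h
  · cases h; omega
  · obtain ⟨j, hj, hpj, -⟩ := scanBack_some ilevels _ _ p h
    have ht := Int.toNat_of_nonneg h0
    omega

lemma prsList_vals (ilevels : List Int) (n : Int) : ∀ (l : List Int) (out : List Int),
    (∀ i ∈ l, 0 ≤ i ∧ i < n) → prsList ilevels l = some out →
    ∀ x ∈ out, -1 ≤ x ∧ x < n := by
  intro l
  induction l with
  | nil =>
      intro out _ h x hx
      simp [prsList] at h
      subst h
      simp at hx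
  | cons i rest ih =>
      intro out hb h
      simp only [prsList] at h
      cases hp : parent_alt ilevels i with
      | none => rw [hp] at h; simp at h
      | some p =>
          rw [hp] at h
          cases hr : prsList ilevels rest with
          | none => rw [hr] at h; simp at h
          | some t =>
              rw [hr] at h
              simp at h
              obtain ⟨hi0, hi1⟩ := hb i (by simp)
              have hpb := parent_alt_bounds ilevels i p hi0 hp
              intro x hx
              rw [← h] at hx
              rcases List.mem_cons.mp hx with hx | hx
              · subst hx; omega
              · exact ih t (fun j hj => hb j (by simp [hj])) hr x hx

lemma set_update_of_forall_mem : ∀ (l : List Int) (s : PySem.Set Int),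
    (∀ x ∈ l, x ∈ s) → PySem.Set.update s l = s := by
  intro l
  induction l with
  | nil => intro s _; simp [PySem.Set.update]
  | cons x xs ih =>
      intro s h
      have hx : s.add x = s := by
        simp [PySem.Set.add, h x (by simp)]
      show PySem.Set.update s (x :: xs) = s
      rw [show PySem.Set.update s (x :: xs) = PySem.Set.update (s.add x) xs from rfl, hx]
      exact ih s (fun y hy => h y (by simp [hy]))

lemma swap_filter_eq_children : ∀ (l : List (Int × Int)) (c : Int),
    ((l.map (fun ip => (ip.2, ip.1))).filter (fun p => p.1 == c)).map (fun p => p.2)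
      = l.filterMap (fun iq => if iq.2 = c then some iq.1 else none) := by
  intro l c
  induction l with
  | nil => simp
  | cons a l ih =>
      by_cases h : a.2 = c <;> simp [h, ih]

lemma groupPhase (prs : List Int) (n : Nat) (hn : prs.length = n)
    (hvals : ∀ x ∈ prs, -1 ≤ x ∧ x < (prs.length : Int)) :
    (PySem.List.enumerate prs).foldl (fun d ip => d.modify ip.2 [] (fun l => l ++ [ip.1]))
      ((PySem.List.pyRange 0 (n : Int) 1).foldl (fun d idx => d.insert idx ([] : List Int))
        (PySem.Dict.empty.insert (-1) [])) = dictOf prs := by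
  have hfresh : ∀ a ∈ PySem.List.pyRange 0 (n : Int) 1,
      (PySem.Dict.empty.insert (-1 : Int) ([] : List Int)).contains a = false := by
    intro a ha
    have h0 : 0 ≤ a := (PySem.List.mem_pyRange_one.mp ha).1
    have hne : ¬ a = -1 := by omega
    simp [PySem.Dict.contains_insert, PySem.Dict.contains_empty, hne]
  have hitems1 : ((PySem.List.pyRange 0 (n : Int) 1).foldl
      (fun d idx => d.insert idx ([] : List Int)) (PySem.Dict.empty.insert (-1) [])).items
      = ((-1 : Int), ([] : List Int)) ::
        (PySem.List.pyRange 0 (n : Int) 1).map (fun a => (a, ([] : List Int))) := by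
    have h := PySem.Dict.items_foldl_insert_fresh (PySem.List.pyRange 0 (n : Int) 1)
      (fun a => a) (fun _ => ([] : List Int)) (PySem.Dict.empty.insert (-1) [])
      hfresh (by simpa using PySem.List.nodup_pyRange_one 0 (n : Int))
    simpa using h
  set chs1 := (PySem.List.pyRange 0 (n : Int) 1).foldl
    (fun d idx => d.insert idx ([] : List Int)) (PySem.Dict.empty.insert (-1) []) with hchs1
  have hkeys1 : chs1.keys = PySem.List.pyRange (-1) (n : Int) 1 := by
    show chs1.items.map (·.1) = _
    rw [hitems1]
    rw [PySem.List.pyRange_one_cons (by omega : (-1 : Int) < (n : Int))]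
    simp [Function.comp_def]
  have hnd1 : chs1.keys.Nodup := by
    rw [hkeys1]; exact PySem.List.nodup_pyRange_one _ _
  have hgd1 : ∀ q : Int, chs1.getD q [] = [] := by
    intro q
    by_cases hq : q ∈ chs1.keys
    · have hmem : (q, ([] : List Int)) ∈ chs1.items := by
        rw [hitems1]
        rw [hkeys1, PySem.List.pyRange_one_cons (by omega : (-1 : Int) < (n : Int))] at hq
        rcases List.mem_cons.mp hq with hq2 | hq2
        · simp [hq2]
        · exact List.mem_cons_of_mem _ (List.mem_map_of_mem hq2)
      exact PySem.Dict.getD_of_mem_items _ hmem hnd1 []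
    · have hc : chs1.contains q = false := by
        by_contra hb
        exact hq ((PySem.Dict.contains_iff_mem_keys _ _).mp (by simpa using hb))
      exact PySem.Dict.getD_of_not_contains _ _ hc
  have hswap : (PySem.List.enumerate prs).foldl
      (fun d ip => d.modify ip.2 [] (fun l => l ++ [ip.1])) chs1
      = ((PySem.List.enumerate prs).map (fun ip => (ip.2, ip.1))).foldl
          (fun d p => d.modify p.1 [] (fun l => l ++ [p.2])) chs1 := by
    rw [List.foldl_map]
  rw [hswap]
  have hmapkey : ((PySem.List.enumerate prs).map (fun ip => (ip.2, ip.1))).map (·.1) = prs := by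
    rw [List.map_map]
    exact PySem.List.map_snd_enumerate prs 0
  have hkeysF : (((PySem.List.enumerate prs).map (fun ip => (ip.2, ip.1))).foldl
      (fun d p => d.modify p.1 [] (fun l => l ++ [p.2])) chs1).keys
      = PySem.List.pyRange (-1) (n : Int) 1 := by
    have h := PySem.Dict.keys_foldl_modify_key
      ((PySem.List.enumerate prs).map (fun ip => (ip.2, ip.1)))
      (fun (p : Int × Int) => p.1) ([] : List Int)
      (fun (_ : PySem.Dict Int (List Int)) (p : Int × Int) => (fun l => l ++ [p.2])) chs1
    rw [h, hmapkey, hkeys1]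
    refine set_update_of_forall_mem prs _ ?_
    intro x hx
    have := hvals x hx
    exact PySem.List.mem_pyRange_one.mpr (by omega)
  have hndF : (((PySem.List.enumerate prs).map (fun ip => (ip.2, ip.1))).foldl
      (fun d p => d.modify p.1 [] (fun l => l ++ [p.2])) chs1).keys.Nodup := by
    exact PySem.Dict.nodup_keys_foldl_modify_key _ (fun (p : Int × Int) => p.1) ([] : List Int)
      (fun (_ : PySem.Dict Int (List Int)) (p : Int × Int) => (fun l => l ++ [p.2])) chs1 hnd1
  have hgdF : ∀ q : Int, (((PySem.List.enumerate prs).map (fun ip => (ip.2, ip.1))).foldl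
      (fun d p => d.modify p.1 [] (fun l => l ++ [p.2])) chs1).getD q [] = childrenOf prs q := by
    intro q
    rw [PySem.Dict.getD_foldl_modify_append, hgd1, swap_filter_eq_children]
    simp [childrenOf]
  apply PySem.Dict.ext
  rw [PySem.Dict.items_eq_map_keys _ hndF ([] : List Int), hkeysF]
  have hR : (dictOf prs).items
      = (PySem.List.pyRange (-1) (n : Int) 1).map (fun q => (q, childrenOf prs q)) := by
    simp only [dictOf, hn]
  rw [hR]
  exact List.map_congr_left (fun q _ => by rw [hgdF q])

lemma chs0_bridge (n : Nat) :
    (PySem.List.pyRange (-1) (n : Int) 1).foldl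
      (fun d p => d.insert p ([] : List Int)) PySem.Dict.empty
    = (PySem.List.pyRange 0 (n : Int) 1).foldl
      (fun d idx => d.insert idx ([] : List Int)) (PySem.Dict.empty.insert (-1) []) := by
  rw [PySem.List.pyRange_one_cons (by omega : (-1 : Int) < (n : Int))]
  simp

lemma make_chs_eq_alt (ilevels : List Int) : make_chs ilevels = make_chs_alt ilevels := by
  have hli0 : ∀ k v, (PySem.Dict.empty.insert (-1 : Int) (-1 : Int)).get? k = some v →
      -1 ≤ v ∧ v < (([] : List Int).length : Int) := by
    intro k v hk
    rw [PySem.Dict.get?_insert] at hk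
    split at hk
    · cases hk; simp
    · rw [PySem.Dict.get?_empty] at hk; cases hk
  have h := loopA_eq ilevels [] (PySem.Dict.empty.insert (-1) (-1)) (by simp) hli0
  simp only [List.length_nil, Int.natCast_zero] at h
  have hdict0 : PySem.Dict.empty.insert (-1 : Int) ([] : List Int) = dictOf [] := by decide
  have hInv0 : ∀ t : Int, (PySem.Dict.empty.insert (-1 : Int) (-1 : Int)).get? t
      = if t = -1 then some (-1) else scanBack ilevels t 0 := by
    intro t
    rw [PySem.Dict.get?_insert]
    by_cases ht : t = -1
    · simp [ht]
    · simp [ht, scanBack, PySem.Dict.get?_empty]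
  have href := ref_eq_scan ilevels ilevels.length 0 (PySem.Dict.empty.insert (-1) (-1)) []
    (by omega) (by omega) rfl hInv0 (by omega)
  simp only [List.drop_zero, Int.natCast_zero] at href
  unfold make_chs make_chs_alt
  rw [hdict0, h, href]
  cases hB : prsList ilevels (PySem.List.pyRange 0 (ilevels.length : Int) 1) with
  | none => simp
  | some prs =>
      have hlen : prs.length = ilevels.length := by
        have := prsList_length ilevels _ prs hB
        rw [PySem.List.length_pyRange_one] at this
        omega
      have hvals : ∀ x ∈ prs, -1 ≤ x ∧ x < (prs.length : Int) := by
        have hb : ∀ i ∈ PySem.List.pyRange 0 (ilevels.length : Int) 1,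
            0 ≤ i ∧ i < (ilevels.length : Int) := by
          intro i hi; exact PySem.List.mem_pyRange_one.mp hi
        have := prsList_vals ilevels (ilevels.length : Int) _ prs hb hB
        intro x hx
        have h2 := this x hx
        omega
      simp only [Option.map_some, List.nil_append]
      refine congrArg (fun x => Prod.mk x prs) ?_
      show (dictOf prs).items
        = ((PySem.List.enumerate prs).foldl
            (fun d ip => d.modify ip.2 [] (fun l => l ++ [ip.1]))
            ((PySem.List.pyRange (-1) (ilevels.length : Int) 1).foldl
              (fun d p => d.insert p ([] : List Int)) PySem.Dict.empty)).items
      rw [chs0_bridge, groupPhase prs ilevels.length hlen hvals]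

-- ===== VERDICT (by name: the statement is the Claim_ definition above) =====
theorem make_chs_spec : Claim_equal_make_chs := by
  intro ilevels _ _
  unfold Spec_make_chs
  exact make_chs_eq_alt ilevels
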